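-- pv_equiv track=rewrite | github.com/MrBrantCode/unitest_baseline | mut_generate/mist_train_taco/taco_436/solution.py | min_color_tree_edges
-- ===== SOURCE A (Python) =====
-- def min_color_tree_edges(N, edges):
--     # Initialize the adjacency list for the tree
--     edge = [[] for _ in range(N)]
--
--     # Populate the adjacency list with edges and their indices
--     for idx, (a, b) in enumerate(edges):
--         edge[a - 1].append((b - 1, idx))
--         edge[b - 1].append((a - 1, idx))
--
--     # Determine the maximum degree of the tree, which is the minimum number of colors needed
--     k = max((len(e) for e in edge))
--
--     # Initialize the answer list for edge colors
--     ans = [-1] * (N - 1)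
--
--     # Depth-first search function to color the edges
--     def dfs(v=0, p=-1, to_p_col=-1):
--         col = 1
--         for (u, idx) in edge[v]:
--             if u != p:
--                 if col == to_p_col:
--                     col += 1
--                 ans[idx] = col
--                 dfs(u, v, col)
--                 col += 1
--
--     # Start the DFS from the root node (vertex 0)
--     dfs()
--
--     # Return the number of colors used and the list of edge colors
--     return k, ans
-- ===== SOURCE B (Python) =====
-- def min_color_tree_edges(N, edges):
--     # Iterative explicit-stack DFS instead of recursion; frames carry the
--     # pending neighbour list and the colour of the edge to the parent.
--     edge = [[] for _ in range(N)]
--     for idx, (a, b) in enumerate(edges):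
--         edge[a - 1].append((b - 1, idx))
--         edge[b - 1].append((a - 1, idx))
--     k = max(len(e) for e in edge)
--     ans = [-1] * (N - 1)
--     # frame: (v, parent, colour of edge to parent, next colour to try, remaining neighbours)
--     stack = [(0, -1, -1, 1, edge[0])]
--     while stack:
--         v, p, to_p_col, col, rem = stack.pop()
--         if rem:
--             (u, idx), rem = rem[0], rem[1:]
--             if u != p:
--                 if col == to_p_col:
--                     col += 1
--                 ans[idx] = col
--                 stack.append((v, p, to_p_col, col + 1, rem))
--                 stack.append((u, v, col, 1, edge[u]))
--             else:
--                 stack.append((v, p, to_p_col, col, rem))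
--     return k, ans
-- ===== Notes on version B (the rewrite author's own statement) =====
-- stated objective: alternative
-- what changed: Replaces A's recursive dfs closure mutating ans by an explicit-stack iterative DFS whose frames carry (vertex, parent, parent-edge colour, next colour to try, remaining neighbour list); adjacency list and max-degree k are computed the same way.
-- outside the precondition, e.g. on min_color_tree_edges(4, [(-3, 3)]): A returns (1, [2, -1, -1]), B returns (1, [2, -1, -1])
import Mathlib
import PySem

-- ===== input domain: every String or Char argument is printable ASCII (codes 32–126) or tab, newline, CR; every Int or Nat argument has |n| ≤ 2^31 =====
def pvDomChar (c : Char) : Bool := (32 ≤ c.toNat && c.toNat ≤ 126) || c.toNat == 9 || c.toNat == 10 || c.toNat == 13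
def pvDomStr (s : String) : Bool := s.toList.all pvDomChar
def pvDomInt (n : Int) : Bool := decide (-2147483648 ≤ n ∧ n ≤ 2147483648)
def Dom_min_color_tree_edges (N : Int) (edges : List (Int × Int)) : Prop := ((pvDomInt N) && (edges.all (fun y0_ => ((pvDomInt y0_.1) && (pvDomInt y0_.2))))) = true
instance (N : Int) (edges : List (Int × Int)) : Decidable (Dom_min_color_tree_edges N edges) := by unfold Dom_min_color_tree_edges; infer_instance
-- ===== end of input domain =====

-- B replaces A's recursive dfs by an explicit-stack iterative DFS (frames carry the pending
-- neighbour list and the colour of the edge to the parent); same adjacency list, same k, same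
-- colours — alternative decomposition, not claimed faster.

-- ===== PORT A =====
-- edge[i].append(x)  (shared by both ports; pyGetD/pySetD give Python's negative-index semantics)
def pvAppendAt (edge : List (List (Int × Int))) (i : Int) (x : Int × Int) : List (List (Int × Int)) :=
  PySem.List.pySetD edge i (PySem.List.pyGetD edge i [] ++ [x])

-- ans[idx] = col  (shared helper)
def pvSetAns (ans : List Int) (idx col : Int) : List Int :=
  PySem.List.pySetD ans idx col

-- A's dfs; the Nat fuel (one unit per neighbour examined / per loop exit) only makes the
-- recursion total; with the budget the ports pass it is never exhausted on inputs admitted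
-- by Pre_ below.  The returned Nat is the remaining fuel, bounded by the input fuel so that
-- the sibling continuation terminates.
mutual
def pvDfsA (edge : List (List (Int × Int))) (fuel : Nat) (v p tpc : Int) (ans : List Int) :
    {r : List Int × Nat // r.2 ≤ fuel} :=
  pvGoA edge fuel (PySem.List.pyGetD edge v []) v p tpc 1 ans
  termination_by (fuel, 1)

def pvGoA (edge : List (List (Int × Int))) (fuel : Nat) (lst : List (Int × Int))
    (v p tpc col : Int) (ans : List Int) : {r : List Int × Nat // r.2 ≤ fuel} :=
  match fuel, lst with
  | 0, _ => ⟨(ans, 0), Nat.le_refl 0⟩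
  | fuel + 1, [] => ⟨(ans, fuel), Nat.le_succ fuel⟩
  | fuel + 1, (u, idx) :: rest =>
    if u ≠ p then
      let col2 := if col = tpc then col + 1 else col
      match pvDfsA edge fuel u v col2 (pvSetAns ans idx col2) with
      | ⟨(ans2, fuel2), h⟩ =>
        match pvGoA edge fuel2 rest v p tpc (col2 + 1) ans2 with
        | ⟨r, h2⟩ => ⟨r, by omega⟩
    else
      match pvGoA edge fuel rest v p tpc col ans with
      | ⟨r, h⟩ => ⟨r, by omega⟩
  termination_by (fuel, 0)
  decreasing_by all_goals (simp_wf; omega)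
end

def min_color_tree_edges (N : Int) (edges : List (Int × Int)) : Int × List Int :=
  let edge := (PySem.List.enumerate edges).foldl
    (fun e q => pvAppendAt (pvAppendAt e (q.2.1 - 1) (q.2.2 - 1, q.1)) (q.2.2 - 1) (q.2.1 - 1, q.1))
    (List.replicate N.toNat [])
  let k : Int :=
    match edge.map (fun e => (e.length : Int)) with
    | [] => 0          -- Python: max() raises ValueError here (only when N ≤ 0, outside Pre_)
    | d :: ds => ds.foldl max d
  let ans0 : List Int := List.replicate (N - 1).toNat (-1)
  (k, (pvDfsA edge ((2 * edges.length + 2) ^ 3 + 16) 0 (-1) (-1) ans0).val.1)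

-- ===== PORT B =====
-- frame: (v, parent, colour of edge to parent, next colour to try, remaining neighbours)
def pvLoopB (edge : List (List (Int × Int))) (fuel : Nat)
    (stack : List (Int × Int × Int × Int × List (Int × Int))) (ans : List Int) : List Int :=
  match stack with
  | [] => ans
  | (v, p, tpc, col, rem) :: rest =>
    match fuel with
    | 0 => ans        -- fuel only makes the while-loop total; never reached under Pre_
    | fuel + 1 =>
      match rem with
      | [] => pvLoopB edge fuel rest ans
      | (u, idx) :: rem' =>
        if u ≠ p then
          let col2 := if col = tpc then col + 1 else col
          pvLoopB edge fuel
            ((u, v, col2, 1, PySem.List.pyGetD edge u []) :: (v, p, tpc, col2 + 1, rem') :: rest)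
            (pvSetAns ans idx col2)
        else
          pvLoopB edge fuel ((v, p, tpc, col, rem') :: rest) ans

def min_color_tree_edges_alt (N : Int) (edges : List (Int × Int)) : Int × List Int :=
  let edge := (PySem.List.enumerate edges).foldl
    (fun e q => pvAppendAt (pvAppendAt e (q.2.1 - 1) (q.2.2 - 1, q.1)) (q.2.2 - 1) (q.2.1 - 1, q.1))
    (List.replicate N.toNat [])
  let k : Int :=
    match edge.map (fun e => (e.length : Int)) with
    | [] => 0
    | d :: ds => ds.foldl max d
  let ans0 : List Int := List.replicate (N - 1).toNat (-1)
  (k, pvLoopB edge ((2 * edges.length + 2) ^ 3 + 16)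
        [(0, -1, -1, 1, PySem.List.pyGetD edge 0 [])] ans0)

-- ===== PRECONDITION & SPEC =====
-- one expansion pass of undirected reachability
def pvReachStep (nbrs : List (Int × Int)) (S : List Int) : List Int :=
  nbrs.foldl (fun T q => if T.contains q.1 && !T.contains q.2 then T ++ [q.2] else T) S

-- positions (indices mod N, as Python's negative indexing wraps) reachable from vertex 0
def pvComp (N : Int) (edges : List (Int × Int)) : List Int :=
  let nbrs := edges.foldr (fun q acc =>
    (PySem.Int.mod (q.1 - 1) N, PySem.Int.mod (q.2 - 1) N) ::
    (PySem.Int.mod (q.2 - 1) N, PySem.Int.mod (q.1 - 1) N) :: acc) []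
  (List.range (edges.length + 1)).foldl (fun S _ => pvReachStep nbrs S) [0]

-- edges incident (by wrapped position) to the component of vertex 0, with their 0-based index
def pvIncident (N : Int) (edges : List (Int × Int)) : List (Int × Int × Int) :=
  (PySem.List.enumerate edges).filterMap (fun q =>
    if (pvComp N edges).contains (PySem.Int.mod (q.2.1 - 1) N) ||
       (pvComp N edges).contains (PySem.Int.mod (q.2.2 - 1) N)
    then some (q.1, q.2.1, q.2.2) else none)

-- Pre_ = the inputs on which Python A returns normally: N ≥ 1 (else ValueError on max of an empty
-- sequence), labels inside Python's index range (else IndexError), and, on the part of the graph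
-- the dfs actually explores (the component of vertex 0): a single consistent label per vertex with
-- vertex 0 named by label 1 (two labels reaching the same list slot via Python's negative indexing
-- can defeat the u != p parent test and make the recursion diverge), at most one self-looped vertex
-- (two distinct self-loops reset the parent test against each other and diverge), no cycle (else
-- RecursionError), and every incident edge index < N-1 (else IndexError writing ans).  These are
-- sufficient conditions: a few aliased-label inputs on which A still returns are excluded (A and B
-- agree on every excluded input on which A does return; see the cites).  The equivalence theorem
-- itself holds for every input of Dom_: Pre_ only delimits where Python A returns normally.
def Pre_min_color_tree_edges (N : Int) (edges : List (Int × Int)) : Prop :=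
  1 ≤ N ∧
  (∀ q ∈ edges, 1 - N ≤ q.1 ∧ q.1 ≤ N ∧ 1 - N ≤ q.2 ∧ q.2 ≤ N) ∧
  (∀ x ∈ (pvIncident N edges).flatMap (fun r => [r.2.1 - 1, r.2.2 - 1]),
    (∀ y ∈ (pvIncident N edges).flatMap (fun r => [r.2.1 - 1, r.2.2 - 1]),
      PySem.Int.mod x N = PySem.Int.mod y N → x = y) ∧
    (PySem.Int.mod x N = 0 → x = 0)) ∧
  (∀ r ∈ pvIncident N edges, ∀ r' ∈ pvIncident N edges,
    PySem.Int.mod (r.2.1 - 1) N = PySem.Int.mod (r.2.2 - 1) N →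
    PySem.Int.mod (r'.2.1 - 1) N = PySem.Int.mod (r'.2.2 - 1) N →
    PySem.Int.mod (r.2.1 - 1) N = PySem.Int.mod (r'.2.1 - 1) N) ∧
  (∀ r ∈ pvIncident N edges, r.1 < N - 1) ∧
  (PySem.List.dedup ((pvIncident N edges).filterMap (fun r =>
      if PySem.Int.mod (r.2.1 - 1) N ≠ PySem.Int.mod (r.2.2 - 1) N
      then some (min (PySem.Int.mod (r.2.1 - 1) N) (PySem.Int.mod (r.2.2 - 1) N),
                 max (PySem.Int.mod (r.2.1 - 1) N) (PySem.Int.mod (r.2.2 - 1) N))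
      else none))).length + 1 = (pvComp N edges).length

instance (N : Int) (edges : List (Int × Int)) : Decidable (Pre_min_color_tree_edges N edges) := by
  unfold Pre_min_color_tree_edges; infer_instance

def pvWitness_min_color_tree_edges : Int × (List (Int × Int)) := (3, [(1, 2), (3, 1)])

def Spec_min_color_tree_edges (N : Int) (edges : List (Int × Int)) (out : Int × List Int) : Prop :=
  out = min_color_tree_edges_alt N edges
instance (N : Int) (edges : List (Int × Int)) (out : Int × List Int) :
    Decidable (Spec_min_color_tree_edges N edges out) := by
  unfold Spec_min_color_tree_edges; infer_instance

-- ===== CLAIM (what is proved, stated in full; the proofs are below) =====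
def Claim_equal_min_color_tree_edges : Prop :=
  ∀ (N : Int) (edges : List (Int × Int)), Dom_min_color_tree_edges N edges →
    Pre_min_color_tree_edges N edges →
    Spec_min_color_tree_edges N edges (min_color_tree_edges N edges)

-- ===== LEMMAS AND PROOFS =====

lemma pvLoopB_zero (edge : List (List (Int × Int))) (st : List (Int × Int × Int × Int × List (Int × Int)))
    (ans : List Int) : pvLoopB edge 0 st ans = ans := by
  cases st <;> simp [pvLoopB]

lemma pvLoopB_nil (edge : List (List (Int × Int))) (fuel : Nat) (ans : List Int) :
    pvLoopB edge fuel [] ans = ans := by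
  simp [pvLoopB]

-- the explicit stack of B runs A's neighbour loop frame by frame
lemma pvLoop_eq_go (edge : List (List (Int × Int))) :
    ∀ (fuel : Nat) (lst : List (Int × Int)) (v p tpc col : Int)
      (rest : List (Int × Int × Int × Int × List (Int × Int))) (ans : List Int),
      pvLoopB edge fuel ((v, p, tpc, col, lst) :: rest) ans =
        pvLoopB edge (pvGoA edge fuel lst v p tpc col ans).val.2 rest
          (pvGoA edge fuel lst v p tpc col ans).val.1 := by
  intro fuel
  induction fuel using Nat.strong_induction_on with
  | _ fuel ih =>
    intro lst v p tpc col rest ans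
    match fuel with
    | 0 => simp [pvLoopB_zero, pvGoA]
    | fuel + 1 =>
      match lst with
      | [] => simp [pvLoopB, pvGoA]
      | (u, idx) :: rem' =>
        by_cases hu : u = p
        · simp only [pvLoopB, pvGoA, hu, ne_eq, not_true_eq_false, if_false]
          rw [ih fuel (by omega)]
        · simp only [pvLoopB, pvGoA, ne_eq, hu, not_false_eq_true, if_true]
          rw [ih fuel (by omega)]
          have hle := (pvGoA edge fuel (PySem.List.pyGetD edge u []) u v
            (if col = tpc then col + 1 else col) 1
            (pvSetAns ans idx (if col = tpc then col + 1 else col))).property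
          rw [ih _ (Nat.lt_succ_of_le hle)]
          rw [pvDfsA]

-- root call: the single initial frame of B runs exactly A's root dfs
lemma pvRoot_eq (edge : List (List (Int × Int))) (F : Nat) (ans0 : List Int) :
    (pvDfsA edge F 0 (-1) (-1) ans0).val.1 =
      pvLoopB edge F [(0, -1, -1, 1, PySem.List.pyGetD edge 0 [])] ans0 := by
  rw [pvLoop_eq_go]
  simp [pvDfsA, pvLoopB_nil]

-- ===== VERDICT (by name: the statement is the Claim_ definition above) =====
theorem min_color_tree_edges_spec : Claim_equal_min_color_tree_edges := by
  intro N edges _ _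
  simp only [Spec_min_color_tree_edges, min_color_tree_edges, min_color_tree_edges_alt, pvRoot_eq]
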